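-- pv_equiv track=rewrite | github.com/luxurioupotato/mem-agent | agents/business_intelligence.py | _create_implementation_timeline
-- ===== SOURCE A (Python) =====
-- from typing import Dict, List, Any, Optional
--
-- def _create_implementation_timeline(strategies: List[Dict]) -> Dict[str, List[str]]:
--     """Create implementation timeline for strategies"""
--     timeline = {
--         'month_1': [],
--         'month_2': [],
--         'month_3': [],
--         'month_4': [],
--         'month_5': [],
--         'month_6': []
--     }
--
--     for i, strategy in enumerate(strategies):
--         if i < 2:
--             timeline['month_1'].append(strategy['strategy'])
--         elif i < 4:
--             timeline['month_2'].append(strategy['strategy'])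
--         else:
--             timeline['month_3'].append(strategy['strategy'])
--
--     return timeline
-- ===== SOURCE B (Python) =====
-- def _create_implementation_timeline(strategies):
--     """Create implementation timeline for strategies"""
--     it = iter(strategies)
--     timeline = {}
--     quotas = [('month_1', 2), ('month_2', 2), ('month_3', len(strategies)),
--               ('month_4', 0), ('month_5', 0), ('month_6', 0)]
--     for month, quota in quotas:
--         bucket = []
--         for _ in range(quota):
--             try:
--                 s = next(it)
--             except StopIteration:
--                 break
--             bucket.append(s['strategy'])
--         timeline[month] = bucket
--     return timeline
-- ===== Notes on version B (the rewrite author's own statement) =====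
-- stated objective: alternative
-- what changed: Instead of one pass over the strategies with an index branch choosing a dict key, B loops over the six months with per-month quotas (2, 2, rest, 0, 0, 0) and consumes strategies from a shared iterator, filling each month's bucket in turn.
import Mathlib
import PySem

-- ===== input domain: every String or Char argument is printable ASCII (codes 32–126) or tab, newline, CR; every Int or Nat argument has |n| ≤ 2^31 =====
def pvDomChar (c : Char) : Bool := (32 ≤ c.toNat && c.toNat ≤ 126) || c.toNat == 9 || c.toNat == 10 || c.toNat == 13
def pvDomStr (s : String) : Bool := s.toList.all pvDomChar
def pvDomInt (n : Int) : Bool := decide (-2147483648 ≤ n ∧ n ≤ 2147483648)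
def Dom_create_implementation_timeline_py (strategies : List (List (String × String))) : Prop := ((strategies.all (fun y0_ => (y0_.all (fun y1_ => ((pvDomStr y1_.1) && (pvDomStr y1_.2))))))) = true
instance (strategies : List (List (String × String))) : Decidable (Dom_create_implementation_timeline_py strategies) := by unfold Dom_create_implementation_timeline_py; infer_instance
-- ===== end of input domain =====

-- B replaces A's single indexed pass (branching on the element index to pick a month) by a
-- loop over the six months with per-month quotas consuming the strategies from a shared
-- iterator; alternative decomposition, same cost.

-- d['strategy'] for an association-list dict: first match; Pre_ guarantees it exists,
-- the "" default is never reached inside Pre_.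
def pvStrategyVal (d : List (String × String)) : String :=
  (List.lookup "strategy" d).getD ""

-- timeline[k].append(v) on the association-list dict (exact: keys are distinct literals)
def pvAppendAt (tl : List (String × List String)) (k : String) (v : String) :
    List (String × List String) :=
  tl.map (fun p => if p.1 = k then (p.1, p.2 ++ [v]) else p)

-- ===== PORT A =====
def create_implementation_timeline_py (strategies : List (List (String × String))) : List (String × List String) :=
  let timeline : List (String × List String) :=
    [("month_1", []), ("month_2", []), ("month_3", []),
     ("month_4", []), ("month_5", []), ("month_6", [])]
  (PySem.List.enumerate strategies 0).foldl
    (fun tl p =>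
      if p.1 < 2 then pvAppendAt tl "month_1" (pvStrategyVal p.2)
      else if p.1 < 4 then pvAppendAt tl "month_2" (pvStrategyVal p.2)
      else pvAppendAt tl "month_3" (pvStrategyVal p.2))
    timeline

-- ===== PORT B =====
-- the inner 'for _ in range(quota): next(it)' loop of Source B: the iterator is the list of
-- not-yet-consumed strategies; returns (bucket, remaining iterator)
def pvTakeQuota (quota : Nat) (it : List (List (String × String))) :
    List String × List (List (String × String)) :=
  match quota, it with
  | 0, it => ([], it)
  | _ + 1, [] => ([], [])            -- StopIteration: break
  | q + 1, d :: it =>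
    let (bucket, it') := pvTakeQuota q it
    (pvStrategyVal d :: bucket, it')

def create_implementation_timeline_py_alt (strategies : List (List (String × String))) : List (String × List String) :=
  let quotas : List (String × Nat) :=
    [("month_1", 2), ("month_2", 2), ("month_3", strategies.length),
     ("month_4", 0), ("month_5", 0), ("month_6", 0)]
  (quotas.foldl
    (fun st p =>
      let (bucket, it') := pvTakeQuota p.2 st.2
      (st.1 ++ [(p.1, bucket)], it'))
    (([] : List (String × List String)), strategies)).1

-- ===== PRECONDITION & SPEC =====
-- Pre_ excludes inputs where some dict lacks the 'strategy' key: the Python A (and B) raise KeyError there.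
def Pre_create_implementation_timeline_py (strategies : List (List (String × String))) : Prop :=
  (strategies.all (fun d => (List.lookup "strategy" d).isSome)) = true
instance (strategies : List (List (String × String))) : Decidable (Pre_create_implementation_timeline_py strategies) := by unfold Pre_create_implementation_timeline_py; infer_instance

def pvWitness_create_implementation_timeline_py : (List (List (String × String))) :=
  [[("strategy", "a")], [("strategy", "b")], [("strategy", "c")]]

def Spec_create_implementation_timeline_py (strategies : List (List (String × String))) (out : List (String × List String)) : Prop := out = create_implementation_timeline_py_alt strategies
instance (strategies : List (List (String × String))) (out : List (String × List String)) : Decidable (Spec_create_implementation_timeline_py strategies out) := by unfold Spec_create_implementation_timeline_py; infer_instance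

-- ===== CLAIM (what is proved, stated in full; the proofs are below) =====
def Claim_equal_create_implementation_timeline_py : Prop := ∀ (strategies : List (List (String × String))), Dom_create_implementation_timeline_py strategies → Pre_create_implementation_timeline_py strategies → Spec_create_implementation_timeline_py strategies (create_implementation_timeline_py strategies)

-- ===== LEMMAS AND PROOFS =====

-- from index 4 on, every step of A's loop appends into month_3
theorem pv_fold_tail (xs : List (List (String × String))) :
    ∀ (s : Int), 4 ≤ s → ∀ (tl : List (String × List String)),
    (PySem.List.enumerate xs s).foldl
      (fun tl p =>
        if p.1 < 2 then pvAppendAt tl "month_1" (pvStrategyVal p.2)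
        else if p.1 < 4 then pvAppendAt tl "month_2" (pvStrategyVal p.2)
        else pvAppendAt tl "month_3" (pvStrategyVal p.2)) tl
    = xs.foldl (fun tl d => pvAppendAt tl "month_3" (pvStrategyVal d)) tl := by
  induction xs with
  | nil => intro s hs tl; simp [PySem.List.enumerate_nil]
  | cons x xs ih =>
    intro s hs tl
    rw [PySem.List.enumerate_cons]
    simp only [List.foldl_cons]
    rw [if_neg (by omega), if_neg (by omega)]
    exact ih (s + 1) (by omega) _

-- folding month_3 appends over the literal timeline accumulates xs.map pvStrategyVal
theorem pv_fold_m3 (xs : List (List (String × String))) :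
    ∀ (a b c : List String),
    xs.foldl (fun tl d => pvAppendAt tl "month_3" (pvStrategyVal d))
      [("month_1", a), ("month_2", b), ("month_3", c),
       ("month_4", []), ("month_5", []), ("month_6", [])]
    = [("month_1", a), ("month_2", b), ("month_3", c ++ xs.map pvStrategyVal),
       ("month_4", []), ("month_5", []), ("month_6", [])] := by
  induction xs with
  | nil => intro a b c; simp
  | cons x xs ih =>
    intro a b c
    simp only [List.foldl_cons, List.map_cons]
    rw [show pvAppendAt [("month_1", a), ("month_2", b), ("month_3", c),
          ("month_4", []), ("month_5", []), ("month_6", [])] "month_3" (pvStrategyVal x)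
        = [("month_1", a), ("month_2", b), ("month_3", c ++ [pvStrategyVal x]),
           ("month_4", []), ("month_5", []), ("month_6", [])] by simp [pvAppendAt]]
    rw [ih]
    simp

-- a quota at least the iterator's length drains it completely
theorem pvTakeQuota_all (xs : List (List (String × String))) :
    ∀ (q : Nat), xs.length ≤ q → pvTakeQuota q xs = (xs.map pvStrategyVal, []) := by
  induction xs with
  | nil => intro q _; cases q <;> simp [pvTakeQuota]
  | cons x xs ih =>
    intro q hq
    cases q with
    | zero => simp at hq
    | succ q => simp [pvTakeQuota, ih q (by simpa using hq)]

-- ===== VERDICT (by name: the statement is the Claim_ definition above) =====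
theorem create_implementation_timeline_py_spec : Claim_equal_create_implementation_timeline_py := by
  intro strategies _ _
  unfold Spec_create_implementation_timeline_py
  unfold create_implementation_timeline_py create_implementation_timeline_py_alt
  match strategies with
  | [] => simp [PySem.List.enumerate_nil, pvTakeQuota]
  | [a] => simp [PySem.List.enumerate, pvAppendAt, pvTakeQuota]
  | [a, b] => simp [PySem.List.enumerate, pvAppendAt, pvTakeQuota]
  | [a, b, c] => simp [PySem.List.enumerate, pvAppendAt, pvTakeQuota]
  | [a, b, c, d] => simp [PySem.List.enumerate, pvAppendAt, pvTakeQuota]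
  | a :: b :: c :: d :: rest =>
    simp only [PySem.List.enumerate_cons, List.foldl_cons, Int.reduceAdd, Int.reduceLT, reduceIte]
    rw [pv_fold_tail rest 4 (by norm_num)]
    rw [show pvAppendAt (pvAppendAt (pvAppendAt (pvAppendAt
          [("month_1", []), ("month_2", []), ("month_3", []),
           ("month_4", []), ("month_5", []), ("month_6", [])]
          "month_1" (pvStrategyVal a)) "month_1" (pvStrategyVal b))
          "month_2" (pvStrategyVal c)) "month_2" (pvStrategyVal d)
        = [("month_1", [pvStrategyVal a, pvStrategyVal b]),
           ("month_2", [pvStrategyVal c, pvStrategyVal d]), ("month_3", []),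
           ("month_4", []), ("month_5", []), ("month_6", [])] by simp [pvAppendAt]]
    rw [pv_fold_m3 rest [pvStrategyVal a, pvStrategyVal b] [pvStrategyVal c, pvStrategyVal d] []]
    simp only [List.foldl_nil, pvTakeQuota, List.length_cons]
    rw [pvTakeQuota_all rest (rest.length + 4) (by omega)]
    simp
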